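-- pv_equiv track=rewrite | github.com/FranklinShack/AdventOfCode | 2022/day1/parta.py | solve
-- ===== SOURCE A (Python) =====
-- def solve(L):
--     answer = 0
--     elves = []
--     calSum = 0
--     for cals in L:
--         if cals == '':
--             elves.append(calSum)
--             calSum=0
--         else:
--             calSum += int(cals)
--     elves.append(calSum)
--     answer = max(elves)
--     return answer
-- ===== SOURCE B (Python) =====
-- def solve(L):
--     # Stage 1: partition the lines into groups of number-strings, splitting on every ''.
--     groups = [[]]
--     for x in L:
--         if x == '':
--             groups.append([])
--         else:
--             groups[-1].append(x)
--     # Stage 2: the answer is the largest group total.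
--     return max(sum(int(x) for x in g) for g in groups)
-- ===== Notes on version B (the rewrite author's own statement) =====
-- stated objective: alternative
-- what changed: A fuses parsing and aggregation in one pass with a running group sum; B first materialises the partition of the input into groups of strings (splitting on every ''), then in a second pass takes the max of the groups' integer sums. Pre_ excludes exactly the inputs where int() raises ValueError on a non-empty line.
import Mathlib
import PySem

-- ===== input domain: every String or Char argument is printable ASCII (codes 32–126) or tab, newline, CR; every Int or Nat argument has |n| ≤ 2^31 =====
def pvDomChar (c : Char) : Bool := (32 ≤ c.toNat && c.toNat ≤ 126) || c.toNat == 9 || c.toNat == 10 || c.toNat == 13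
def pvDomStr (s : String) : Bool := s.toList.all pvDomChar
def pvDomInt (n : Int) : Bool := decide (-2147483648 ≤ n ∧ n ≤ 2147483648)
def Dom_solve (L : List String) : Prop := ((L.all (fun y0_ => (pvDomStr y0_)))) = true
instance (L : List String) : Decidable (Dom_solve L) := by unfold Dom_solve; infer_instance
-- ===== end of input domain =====

-- B partitions the input into groups of strings first and then takes the max of the group sums,
-- instead of A's fused single pass with a running sum; return value only, no mutation.

-- ===== PORT A =====
-- A's loop: forward over L, collecting each finished group sum into `elves`; int(cals) is
-- PySem.Int.ofStr? (exact int()); `.getD 0` is only reached outside Pre_solve (where int() raises).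
def solveLoop : List String → List Int → Int → List Int
  | [], elves, calSum => elves ++ [calSum]
  | cals :: rest, elves, calSum =>
    if cals = "" then solveLoop rest (elves ++ [calSum]) 0
    else solveLoop rest elves (calSum + (PySem.Int.ofStr? cals).getD 0)

def solve (L : List String) : Int :=
  -- answer = max(elves); elves is never empty, so max never raises: getD 0 is unreachable
  (PySem.List.max? (solveLoop L [] 0) (fun y => y)).getD 0

-- ===== PORT B =====
-- groups[-1].append(x): append x to the last group
def appendLast (x : String) : List (List String) → List (List String)
  | [] => []
  | [g] => [g ++ [x]]
  | g :: gs => g :: appendLast x gs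

-- Source B stage 1: the partition loop over L with state `groups`
def altLoop : List String → List (List String) → List (List String)
  | [], groups => groups
  | x :: rest, groups =>
    if x = "" then altLoop rest (groups ++ [[]])
    else altLoop rest (appendLast x groups)

-- sum(int(x) for x in g); `.getD 0` only reached outside Pre_solve
def groupSum (g : List String) : Int :=
  g.foldl (fun acc x => acc + (PySem.Int.ofStr? x).getD 0) 0

def solve_alt (L : List String) : Int :=
  -- Source B stage 2: max over the groups' sums; groups is never empty, so getD 0 is unreachable
  (PySem.List.max? ((altLoop L [[]]).map groupSum) (fun y => y)).getD 0

-- ===== PRECONDITION & SPEC =====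
-- Pre_ excludes exactly the inputs where int(cals) raises ValueError (a non-separator element that is not an int literal).
def Pre_solve (L : List String) : Prop :=
  ∀ s ∈ L, s ≠ "" → (PySem.Int.ofStr? s).isSome = true
instance (L : List String) : Decidable (Pre_solve L) := by unfold Pre_solve; infer_instance

def pvWitness_solve : List String := ["1", "2", "", "30", "", ""]

def Spec_solve (L : List String) (out : Int) : Prop := out = solve_alt L
instance (L : List String) (out : Int) : Decidable (Spec_solve L out) := by unfold Spec_solve; infer_instance

-- ===== CLAIM (what is proved, stated in full; the proofs are below) =====
def Claim_equal_solve : Prop := ∀ (L : List String), Dom_solve L → Pre_solve L → Spec_solve L (solve L)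

-- ===== LEMMAS AND PROOFS =====

theorem solveLoop_acc (rest : List String) : ∀ (elves : List Int) (cal : Int),
    solveLoop rest elves cal = elves ++ solveLoop rest [] cal := by
  induction rest with
  | nil => intro elves cal; simp [solveLoop]
  | cons x t ih =>
    intro elves cal
    simp only [solveLoop, List.nil_append]
    by_cases hx : x = ""
    · simp only [hx, if_true]
      rw [ih (elves ++ [cal]), ih [cal], List.append_assoc]
    · simp only [hx, if_false]
      exact ih elves _

theorem appendLast_append (x : String) (gs : List (List String)) : ∀ (g : List String),
    appendLast x (gs ++ [g]) = gs ++ [g ++ [x]] := by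
  induction gs with
  | nil => intro g; simp [appendLast]
  | cons h t ih =>
    intro g
    cases t with
    | nil => simp [appendLast]
    | cons h' t' => simpa [appendLast] using ih g

theorem altLoop_acc (rest : List String) : ∀ (gs : List (List String)) (g : List String),
    altLoop rest (gs ++ [g]) = gs ++ altLoop rest [g] := by
  induction rest with
  | nil => intro gs g; simp [altLoop]
  | cons x t ih =>
    intro gs g
    simp only [altLoop]
    by_cases hx : x = ""
    · simp only [hx, if_true]
      rw [ih (gs ++ [g]) [], ih [g] [], List.append_assoc]
    · simp only [hx, if_false, appendLast_append]
      rw [ih gs (g ++ [x])]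
      have : appendLast x [g] = [g ++ [x]] := by simp [appendLast]
      rw [this]

theorem main_inv (L : List String) : ∀ (g : List String),
    solveLoop L [] (groupSum g) = (altLoop L [g]).map groupSum := by
  induction L with
  | nil => intro g; simp [solveLoop, altLoop]
  | cons x t ih =>
    intro g
    simp only [solveLoop, altLoop, List.nil_append]
    by_cases hx : x = ""
    · simp only [hx, if_true]
      rw [solveLoop_acc t [groupSum g] 0]
      have h0 : (0 : Int) = groupSum [] := by simp [groupSum]
      rw [show ([g] ++ [([] : List String)]) = [g] ++ [[]] from rfl, altLoop_acc t [g] []]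
      rw [h0, ih []]
      simp [groupSum]
    · simp only [hx, if_false]
      have hg : groupSum g + (PySem.Int.ofStr? x).getD 0 = groupSum (g ++ [x]) := by
        simp [groupSum, List.foldl_append]
      have hA : appendLast x [g] = [g ++ [x]] := by simp [appendLast]
      rw [hg, hA, ih (g ++ [x])]

-- ===== VERDICT (by name: the statement is the Claim_ definition above) =====
theorem solve_spec : Claim_equal_solve := by
  intro L _ _
  unfold Spec_solve solve solve_alt
  have h0 : (0 : Int) = groupSum [] := by simp [groupSum]
  rw [h0, main_inv L []]
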